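-- pv_equiv track=rewrite | github.com/ncsu-swat/incompleter | data/new_all/StackoverflowData-master 2/snippets/snippet-3610-NameError.py | search_clinic
-- ===== SOURCE A (Python) =====
-- def search_clinic(search, array):
--     new_array = []
--     exact_match = []
--     partial_match = []
--     no_match = []
--     # finding mathces and storing them
--     for clinic in array:
--         if search == clinic:
--             exact_match.append(clinic)
--         elif search in clinic:
--             partial_match.append(clinic)
--         else:
--             no_match.append(clinic)
--     # ordering the stored values to one array
--     for clinic in exact_match:
--         new_array.append(clinic)
--     for clinic in partial_match:
--         new_array.append(clinic)
--     for clinic in no_match: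
--         new_array.append(clinic)
--     return new_array
-- ===== SOURCE B (Python) =====
-- def search_clinic(search, array):
--     return sorted(array, key=lambda clinic: 0 if search == clinic else (1 if search in clinic else 2))
-- ===== Notes on version B (the rewrite author's own statement) =====
-- stated objective: idiomatic
-- what changed: Replaces the three-bucket partition plus three concatenation loops with a single stable sort on a 3-valued priority key (0 exact, 1 substring, 2 otherwise).
import Mathlib
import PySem

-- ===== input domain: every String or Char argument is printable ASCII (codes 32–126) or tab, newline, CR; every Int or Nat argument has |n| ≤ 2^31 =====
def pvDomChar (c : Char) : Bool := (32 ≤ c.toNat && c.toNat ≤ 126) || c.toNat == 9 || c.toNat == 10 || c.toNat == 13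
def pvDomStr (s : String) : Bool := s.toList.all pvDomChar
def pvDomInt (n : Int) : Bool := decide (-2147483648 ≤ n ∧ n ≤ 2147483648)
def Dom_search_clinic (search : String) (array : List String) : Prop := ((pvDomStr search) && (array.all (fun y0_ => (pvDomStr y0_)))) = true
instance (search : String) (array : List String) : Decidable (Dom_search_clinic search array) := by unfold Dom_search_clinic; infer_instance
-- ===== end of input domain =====

-- B replaces A's three explicit buckets + three concatenation loops by one stable sort
-- on a 3-valued priority key (idiomatic; same observable result).

-- ===== PORT A =====
-- one pass filling (exact_match, partial_match, no_match), then three append loops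
def search_clinic (search : String) (array : List String) : List String :=
  let t :=
    array.foldl
      (fun (acc : List String × List String × List String) clinic =>
        if search == clinic then (acc.1 ++ [clinic], acc.2.1, acc.2.2)
        else if PySem.Str.isIn search clinic then (acc.1, acc.2.1 ++ [clinic], acc.2.2)
        else (acc.1, acc.2.1, acc.2.2 ++ [clinic]))
      ([], [], [])
  let n1 := t.1.foldl (fun acc clinic => acc ++ [clinic]) []
  let n2 := t.2.1.foldl (fun acc clinic => acc ++ [clinic]) n1
  t.2.2.foldl (fun acc clinic => acc ++ [clinic]) n2

-- ===== PORT B =====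
def search_clinic_alt (search : String) (array : List String) : List String :=
  PySem.List.sorted array
    (fun clinic => if search == clinic then (0 : Nat)
                   else if PySem.Str.isIn search clinic then 1 else 2)
    false

-- ===== PRECONDITION & SPEC =====
def Spec_search_clinic (search : String) (array : List String) (out : List String) : Prop := out = search_clinic_alt search array
instance (search : String) (array : List String) (out : List String) : Decidable (Spec_search_clinic search array out) := by unfold Spec_search_clinic; infer_instance

-- ===== CLAIM (what is proved, stated in full; the proofs are below) =====
def Claim_equal_search_clinic : Prop := ∀ (search : String) (array : List String), Dom_search_clinic search array → Spec_search_clinic search array (search_clinic search array)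

-- ===== LEMMAS AND PROOFS =====

-- insertBy with a strict 'before': if x is not before anything in l and is before the head of r,
-- x is inserted exactly between l and r (stability of Python's sort, made explicit).
theorem insertBy_split {α : Type} (before : α → α → Bool) (x : α) (l r : List α)
    (h1 : ∀ y ∈ l, before x y = false)
    (h2 : ∀ hd, r.head? = some hd → before x hd = true) :
    PySem.List.insertBy before x (l ++ r) = l ++ x :: r := by
  induction l with
  | nil =>
    cases r with
    | nil => simp [PySem.List.insertBy]
    | cons hd t => simp [PySem.List.insertBy, h2 hd rfl]
  | cons a t ih =>
    have ha : before x a = false := h1 a (by simp)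
    simp only [List.cons_append, PySem.List.insertBy, ha, Bool.false_eq_true, if_false]
    rw [ih (fun y hy => h1 y (by simp [hy]))]

-- the triple-bucket invariant of the insertion-sort fold for a 3-valued key
theorem foldl_insertBy_tri (key : String → Nat) (hk : ∀ x, key x ≤ 2)
    (xs : List String) : ∀ (l0 l1 l2 : List String),
    (∀ y ∈ l0, key y = 0) → (∀ y ∈ l1, key y = 1) → (∀ y ∈ l2, key y = 2) →
    xs.foldl (fun acc x => PySem.List.insertBy (fun a b => decide (key a < key b)) x acc)
      (l0 ++ l1 ++ l2)
    = (l0 ++ xs.filter (fun c => key c == 0)) ++ (l1 ++ xs.filter (fun c => key c == 1))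
      ++ (l2 ++ xs.filter (fun c => key c == 2)) := by
  induction xs with
  | nil => intro l0 l1 l2 _ _ _; simp
  | cons x t ih =>
    intro l0 l1 l2 h0 h1 h2
    simp only [List.foldl_cons, List.filter_cons]
    have hbx := hk x
    interval_cases hkx : key x
    · have : PySem.List.insertBy (fun a b => decide (key a < key b)) x (l0 ++ l1 ++ l2)
          = (l0 ++ [x]) ++ l1 ++ l2 := by
        rw [List.append_assoc, insertBy_split]
        · simp
        · intro y hy; simp [h0 y hy, hkx]
        · intro hd hhd
          have : hd ∈ l1 ++ l2 := List.mem_of_mem_head? hhd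
          rcases List.mem_append.mp this with h | h
          · simp [h1 hd h, hkx]
          · simp [h2 hd h, hkx]
      rw [this, ih (l0 ++ [x]) l1 l2
          (by intro y hy; rcases List.mem_append.mp hy with h | h
              · exact h0 y h
              · simp at h; simp [h, hkx]) h1 h2]
      simp
    · have : PySem.List.insertBy (fun a b => decide (key a < key b)) x (l0 ++ l1 ++ l2)
          = l0 ++ (l1 ++ [x]) ++ l2 := by
        have := insertBy_split (fun a b => decide (key a < key b)) x (l0 ++ l1) l2
          (by intro y hy
              rcases List.mem_append.mp hy with h | h
              · simp [h0 y h, hkx]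
              · simp [h1 y h, hkx])
          (by intro hd hhd
              have : hd ∈ l2 := List.mem_of_mem_head? hhd
              simp [h2 hd this, hkx])
        simpa [List.append_assoc] using this
      rw [this, ih l0 (l1 ++ [x]) l2 h0
          (by intro y hy; rcases List.mem_append.mp hy with h | h
              · exact h1 y h
              · simp at h; simp [h, hkx]) h2]
      simp
    · have : PySem.List.insertBy (fun a b => decide (key a < key b)) x (l0 ++ l1 ++ l2)
          = l0 ++ l1 ++ (l2 ++ [x]) := by
        have := PySem.List.insertBy_of_forall_not_before
          (before := fun a b => decide (key a < key b)) (x := x) (ys := l0 ++ l1 ++ l2)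
          (by intro y hy
              rcases List.mem_append.mp hy with h | h
              · rcases List.mem_append.mp h with h' | h'
                · simp [h0 y h', hkx]
                · simp [h1 y h', hkx]
              · have := hk y; simp [h2 y h, hkx])
        simpa [List.append_assoc] using this
      rw [this, ih l0 l1 (l2 ++ [x]) h0 h1
          (by intro y hy; rcases List.mem_append.mp hy with h | h
              · exact h2 y h
              · simp at h; simp [h, hkx])]
      simp

-- A's fold fills the three buckets with the three key-filters
theorem bucket_fold (search : String) (xs : List String) :
    ∀ (e p n : List String),
    xs.foldl
      (fun (acc : List String × List String × List String) clinic =>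
        if search == clinic then (acc.1 ++ [clinic], acc.2.1, acc.2.2)
        else if PySem.Str.isIn search clinic then (acc.1, acc.2.1 ++ [clinic], acc.2.2)
        else (acc.1, acc.2.1, acc.2.2 ++ [clinic])) (e, p, n)
    = (e ++ xs.filter (fun c => (if search == c then (0:Nat) else if PySem.Str.isIn search c then 1 else 2) == 0),
       p ++ xs.filter (fun c => (if search == c then (0:Nat) else if PySem.Str.isIn search c then 1 else 2) == 1),
       n ++ xs.filter (fun c => (if search == c then (0:Nat) else if PySem.Str.isIn search c then 1 else 2) == 2)) := by
  induction xs with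
  | nil => intro e p n; simp
  | cons x t ih =>
    intro e p n
    simp only [List.foldl_cons, List.filter_cons]
    by_cases hx : (search == x) = true
    · rw [if_pos hx, ih]
      simp [hx]
    · by_cases hin : PySem.Str.isIn search x = true
      · rw [if_neg hx, if_pos hin, ih]
        simp at hin
        simp [hx, hin]
      · rw [if_neg hx, if_neg hin, ih]
        simp at hin
        simp [hx, hin]

-- ===== VERDICT (by name: the statement is the Claim_ definition above) =====
theorem search_clinic_spec : Claim_equal_search_clinic := by
  intro search array _
  unfold Spec_search_clinic search_clinic search_clinic_alt
  have hk : ∀ x, (if search == x then (0 : Nat)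
      else if PySem.Str.isIn search x then 1 else 2) ≤ 2 := by
    intro x; split_ifs <;> omega
  rw [PySem.List.sorted_eq_foldl_insertBy]
  have htri := foldl_insertBy_tri
    (fun clinic => if search == clinic then (0 : Nat)
      else if PySem.Str.isIn search clinic then 1 else 2) hk array [] [] []
    (by simp) (by simp) (by simp)
  simp only [List.append_nil, List.nil_append] at htri
  rw [htri, bucket_fold search array]
  simp only [PySem.List.foldl_append_singleton_eq_self, List.nil_append, List.append_assoc]
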